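-- pv_equiv track=rewrite | github.com/theryukverse/AdventOfCode | 2025/Day 3 Lobby - Part 2.py | getMaxVoltage
-- ===== SOURCE A (Python) =====
-- def getMaxVoltage(battery_bank, batteries_limit):
--     if batteries_limit == 0:
--         return ""
--     if len(battery_bank) == batteries_limit:
--         return battery_bank
--     curr_max_index = 0
--     for i in range(1, len(battery_bank) - batteries_limit + 1):
--         if battery_bank[i] > battery_bank[curr_max_index]:
--             curr_max_index = i
--     return battery_bank[curr_max_index] + getMaxVoltage(
--         battery_bank[curr_max_index + 1 :], batteries_limit - 1
--     )
-- ===== SOURCE B (Python) =====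
-- def getMaxVoltage(battery_bank, batteries_limit):
--     # Monotonic stack: one left-to-right pass, pop smaller digits while
--     # enough characters remain to still fill the limit.
--     stack = []
--     n = len(battery_bank)
--     for i, c in enumerate(battery_bank):
--         while stack and stack[-1] < c and len(stack) + (n - i) > batteries_limit:
--             stack.pop()
--         if len(stack) < batteries_limit:
--             stack.append(c)
--     return "".join(stack)
-- ===== Notes on version B (the rewrite author's own statement) =====
-- stated objective: faster
-- what changed: Replaced A's O(n*k) greedy recursion (rescan the window for its max, slice, recurse) by a single left-to-right monotonic-stack pass that pops smaller characters while enough characters remain to fill the limit.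
-- crash fix: A raises IndexError whenever batteries_limit < 0 or batteries_limit > len(battery_bank); B returns '' resp. the whole string there. — e.g. on getMaxVoltage("ab", 5): A raises IndexError, B returns "ab"
import Mathlib
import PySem

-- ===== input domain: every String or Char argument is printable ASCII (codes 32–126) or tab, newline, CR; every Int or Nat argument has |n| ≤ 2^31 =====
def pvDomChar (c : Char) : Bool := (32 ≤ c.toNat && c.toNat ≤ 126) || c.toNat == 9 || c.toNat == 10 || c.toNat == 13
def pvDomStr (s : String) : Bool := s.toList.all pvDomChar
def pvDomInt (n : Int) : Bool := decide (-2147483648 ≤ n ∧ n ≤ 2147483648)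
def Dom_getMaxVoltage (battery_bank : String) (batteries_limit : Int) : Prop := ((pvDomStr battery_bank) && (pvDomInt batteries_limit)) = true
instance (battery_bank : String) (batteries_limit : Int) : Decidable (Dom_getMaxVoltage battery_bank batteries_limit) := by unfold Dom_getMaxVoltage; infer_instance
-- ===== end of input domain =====

-- B replaces A's O(n*k) greedy recursion by a one-pass monotonic stack (objective: faster, asymptotic).

-- ===== PORT A =====
-- Literal port of A's greedy recursion; 'fuel' only makes the same recursion total
-- (inside Pre_ the recursion depth is at most batteries_limit ≤ fuel - 1).
def getMaxVoltageAux (fuel : Nat) (s : List Char) (k : Int) : List Char :=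
  match fuel with
  | 0 => []
  | fuel + 1 =>
    if k = 0 then []
    else if (s.length : Int) = k then s
    else
      let j := (PySem.List.pyRange 1 ((s.length : Int) - k + 1) 1).foldl
        (fun cm i => if PySem.List.pyGetD s i ' ' > PySem.List.pyGetD s cm ' ' then i else cm) 0
      PySem.List.pyGetD s j ' ' ::
        getMaxVoltageAux fuel (PySem.List.slice s (some (j + 1)) none) (k - 1)

def getMaxVoltage (battery_bank : String) (batteries_limit : Int) : String :=
  String.ofList (getMaxVoltageAux (battery_bank.toList.length + 1) battery_bank.toList batteries_limit)

-- ===== PORT B =====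
-- The stack is kept top-at-head (a Lean list grows at the head), so the final answer is reversed
-- once at the end; 'rem' is Python's n - i, the number of characters not yet fully processed.
def popWhile (st : List Char) (c : Char) (rem : Nat) (k : Int) : List Char :=
  match st with
  | [] => []
  | t :: r => if t < c ∧ ((t :: r).length : Int) + rem > k then popWhile r c rem k else t :: r

def runStack (st : List Char) (s : List Char) (k : Int) : List Char :=
  match s with
  | [] => st
  | c :: t =>
    let st1 := popWhile st c (t.length + 1) k
    let st2 := if (st1.length : Int) < k then c :: st1 else st1
    runStack st2 t k

def getMaxVoltage_alt (battery_bank : String) (batteries_limit : Int) : String :=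
  String.ofList (runStack [] battery_bank.toList batteries_limit).reverse

-- ===== PRECONDITION & SPEC =====
-- Pre_ excludes exactly the inputs on which A raises IndexError (limit < 0 or limit > length).
def Pre_getMaxVoltage (battery_bank : String) (batteries_limit : Int) : Prop :=
  0 ≤ batteries_limit ∧ batteries_limit ≤ (battery_bank.toList.length : Int)
instance (battery_bank : String) (batteries_limit : Int) : Decidable (Pre_getMaxVoltage battery_bank batteries_limit) := by unfold Pre_getMaxVoltage; infer_instance

def pvWitness_getMaxVoltage : String × Int := ("ba", 1)

-- A raises IndexError whenever batteries_limit < 0 or batteries_limit > len(battery_bank); B returns "" resp. the whole string there.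
def Raises_getMaxVoltage (battery_bank : String) (batteries_limit : Int) : Prop :=
  batteries_limit < 0 ∨ (battery_bank.toList.length : Int) < batteries_limit
instance (battery_bank : String) (batteries_limit : Int) : Decidable (Raises_getMaxVoltage battery_bank batteries_limit) := by unfold Raises_getMaxVoltage; infer_instance

def pvRaiseWitness_getMaxVoltage : String × Int := ("ab", 5)
def pvRaiseWitnessOut_getMaxVoltage : String := "ab"

def Spec_getMaxVoltage (battery_bank : String) (batteries_limit : Int) (out : String) : Prop := out = getMaxVoltage_alt battery_bank batteries_limit
instance (battery_bank : String) (batteries_limit : Int) (out : String) : Decidable (Spec_getMaxVoltage battery_bank batteries_limit out) := by unfold Spec_getMaxVoltage; infer_instance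

-- ===== CLAIM (what is proved, stated in full; the proofs are below) =====
def Claim_equal_getMaxVoltage : Prop := ∀ (battery_bank : String) (batteries_limit : Int), Dom_getMaxVoltage battery_bank batteries_limit → Pre_getMaxVoltage battery_bank batteries_limit → Spec_getMaxVoltage battery_bank batteries_limit (getMaxVoltage battery_bank batteries_limit)

def Claim_raises_getMaxVoltage : Prop := (∀ (battery_bank : String) (batteries_limit : Int), Dom_getMaxVoltage battery_bank batteries_limit → Raises_getMaxVoltage battery_bank batteries_limit → ¬ Pre_getMaxVoltage battery_bank batteries_limit) ∧ (Dom_getMaxVoltage (pvRaiseWitness_getMaxVoltage.1) (pvRaiseWitness_getMaxVoltage.2) ∧ Raises_getMaxVoltage (pvRaiseWitness_getMaxVoltage.1) (pvRaiseWitness_getMaxVoltage.2) ∧ getMaxVoltage_alt (pvRaiseWitness_getMaxVoltage.1) (pvRaiseWitness_getMaxVoltage.2) = pvRaiseWitnessOut_getMaxVoltage)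

-- ===== LEMMAS AND PROOFS =====

-- Proof-side generalisation of runStack: 'extra' characters virtually appended on the right,
-- so that a run over p ++ q decomposes into a run over p followed by a run over q.
def runAuxE (st : List Char) (s : List Char) (extra : Nat) (k : Int) : List Char :=
  match s with
  | [] => st
  | c :: t =>
    let st1 := popWhile st c (t.length + 1 + extra) k
    let st2 := if (st1.length : Int) < k then c :: st1 else st1
    runAuxE st2 t extra k

theorem runAuxE_zero (st s : List Char) (k : Int) : runAuxE st s 0 k = runStack st s k := by
  induction s generalizing st with
  | nil => rfl
  | cons c t ih => simp [runAuxE, runStack, ih]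

theorem runAuxE_append (st p q : List Char) (extra : Nat) (k : Int) :
    runAuxE st (p ++ q) extra k = runAuxE (runAuxE st p (q.length + extra) k) q extra k := by
  induction p generalizing st with
  | nil => rfl
  | cons c t ih =>
    simp only [List.cons_append, runAuxE, List.length_append]
    rw [show t.length + q.length + 1 + extra = t.length + 1 + (q.length + extra) from by omega]
    exact ih _

theorem mem_popWhile {x : Char} (st : List Char) (c : Char) (rem : Nat) (k : Int)
    (hx : x ∈ popWhile st c rem k) : x ∈ st := by
  induction st with
  | nil => simp [popWhile] at hx
  | cons t r ih =>
    rw [popWhile] at hx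
    split at hx
    · exact List.mem_cons_of_mem _ (ih hx)
    · exact hx

theorem mem_runAuxE {x : Char} (st s : List Char) (extra : Nat) (k : Int)
    (hx : x ∈ runAuxE st s extra k) : x ∈ st ∨ x ∈ s := by
  induction s generalizing st with
  | nil => exact Or.inl hx
  | cons c t ih =>
    rw [runAuxE] at hx
    rcases ih _ hx with h | h
    · by_cases hc : ((popWhile st c (t.length + 1 + extra) k).length : Int) < k
      · simp only [hc, if_pos] at h
        rcases List.mem_cons.mp h with h | h
        · exact Or.inr (by simp [h])
        · exact Or.inl (mem_popWhile _ _ _ _ h)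
      · simp only [hc, if_neg, not_false_iff] at h
        exact Or.inl (mem_popWhile _ _ _ _ h)
    · exact Or.inr (List.mem_cons_of_mem _ h)

theorem popWhile_of_all_lt (st : List Char) (c : Char) (rem : Nat) (k : Int)
    (hall : ∀ x ∈ st, x < c) (hrem : (1 : Int) + rem > k) : popWhile st c rem k = [] := by
  induction st with
  | nil => rfl
  | cons t r ih =>
    rw [popWhile, if_pos]
    · exact ih (fun x hx => hall x (List.mem_cons_of_mem _ hx))
    · refine ⟨hall t (List.mem_cons_self), ?_⟩
      have : (1 : Int) ≤ ((t :: r).length : Int) := by simp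
      omega

theorem popWhile_of_le (st : List Char) (c : Char) (rem : Nat) (k : Int)
    (h : ¬ ((st.length : Int) + rem > k)) : popWhile st c rem k = st := by
  cases st with
  | nil => rfl
  | cons t r =>
    rw [popWhile, if_neg]
    intro ⟨_, h2⟩
    exact h h2

theorem runAuxE_nil_of_nonpos (s : List Char) (extra : Nat) (k : Int) (hk : k ≤ 0) :
    runAuxE [] s extra k = [] := by
  induction s with
  | nil => rfl
  | cons c t ih =>
    rw [runAuxE]
    simp only [popWhile]
    rw [if_neg (by simp; omega)]
    exact ih

theorem runAuxE_all_take (st s : List Char) (k : Int)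
    (h : (st.length : Int) + s.length ≤ k) : runAuxE st s 0 k = s.reverse ++ st := by
  induction s generalizing st with
  | nil => rfl
  | cons c t ih =>
    rw [runAuxE]
    rw [popWhile_of_le st c (t.length + 1 + 0) k (by simp at h ⊢; omega)]
    rw [if_pos (by simp at h ⊢; omega)]
    rw [ih (c :: st) (by simp at h ⊢; omega)]
    simp

theorem popWhile_append_b (st : List Char) (b c : Char) (rem : Nat) (k : Int)
    (hb : ¬ (b < c ∧ (1 : Int) + rem > k)) :
    popWhile (st ++ [b]) c rem k = popWhile st c rem (k - 1) ++ [b] := by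
  induction st with
  | nil =>
    simp only [List.nil_append, popWhile]
    rw [if_neg (by rintro ⟨h1, h2⟩; exact hb ⟨h1, by simp at h2; omega⟩)]
  | cons t r ih =>
    simp only [List.cons_append, popWhile]
    by_cases htc : t < c
    · by_cases hlen : ((t :: r).length : Int) + rem > k - 1
      · rw [if_pos ⟨htc, by simp at hlen ⊢; omega⟩, if_pos ⟨htc, hlen⟩]
        exact ih
      · rw [if_neg (by rintro ⟨_, h2⟩; simp at h2 hlen; omega), if_neg (by rintro ⟨_, h2⟩; exact hlen h2)]
        simp
    · rw [if_neg (by rintro ⟨h1, _⟩; exact htc h1), if_neg (by rintro ⟨h1, _⟩; exact htc h1)]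
      simp

theorem runAuxE_append_b (st s : List Char) (b : Char) (extra : Nat) (k : Int)
    (H : ∀ (jt : Nat) (h : jt < s.length), b < s[jt] → (1 : Int) + ((s.length - jt : Nat) + extra) ≤ k) :
    runAuxE (st ++ [b]) s extra k = runAuxE st s extra (k - 1) ++ [b] := by
  induction s generalizing st with
  | nil => rfl
  | cons c t ih =>
    rw [runAuxE, runAuxE]
    have h0 : ¬ (b < c ∧ (1 : Int) + (t.length + 1 + extra) > k) := by
      intro ⟨h1, h2⟩
      have := H 0 (by simp) (by simpa using h1)
      simp at this
      omega
    rw [popWhile_append_b st b c _ k h0]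
    have hlen : (((popWhile st c (t.length + 1 + extra) (k - 1) ++ [b]).length : Int) < k) ↔
        (((popWhile st c (t.length + 1 + extra) (k - 1)).length : Int) < k - 1) := by
      simp; omega
    by_cases hp : ((popWhile st c (t.length + 1 + extra) (k - 1)).length : Int) < k - 1
    · rw [if_pos (hlen.mpr hp), if_pos hp]
      rw [show c :: (popWhile st c (t.length + 1 + extra) (k - 1) ++ [b]) =
        (c :: popWhile st c (t.length + 1 + extra) (k - 1)) ++ [b] by simp]
      exact ih _ (fun jt hjt hb' => by
        have := H (jt + 1) (by simp; omega) (by simpa using hb')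
        simp at this ⊢
        omega)
    · rw [if_neg (fun h => hp (hlen.mp h)), if_neg hp]
      exact ih _ (fun jt hjt hb' => by
        have := H (jt + 1) (by simp; omega) (by simpa using hb')
        simp at this ⊢
        omega)

theorem fold_argmax (s : List Char) (L : Nat) (hL : L < s.length) :
    ∃ j : Nat, j ≤ L ∧
      ((PySem.List.pyRange 1 ((L : Int) + 1) 1).foldl
        (fun cm i => if PySem.List.pyGetD s i ' ' > PySem.List.pyGetD s cm ' ' then i else cm) 0 = (j : Int)) ∧
      (∀ i : Nat, i ≤ L → s.getD i ' ' ≤ s.getD j ' ') ∧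
      (∀ i : Nat, i < j → s.getD i ' ' < s.getD j ' ') := by
  induction L with
  | zero =>
    refine ⟨0, le_rfl, ?_, ?_, ?_⟩
    · rw [show ((0 : Nat) : Int) + 1 = 1 from by norm_num, PySem.List.pyRange_one_eq_nil le_rfl]
      rfl
    · intro i hi; interval_cases i; exact le_rfl
    · intro i hi; omega
  | succ L ih =>
    obtain ⟨j, hjL, hfold, hmax, hstrict⟩ := ih (by omega)
    have hsplit : PySem.List.pyRange 1 (((L + 1 : Nat) : Int) + 1) 1
        = PySem.List.pyRange 1 ((L : Int) + 1) 1 ++ [((L + 1 : Nat) : Int)] := by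
      rw [show (((L + 1 : Nat) : Int) + 1) = ((L : Int) + 1) + 1 from by push_cast; ring]
      rw [PySem.List.pyRange_one_succ_right (by omega)]
      push_cast
      ring_nf
    rw [hsplit, List.foldl_append, hfold]
    simp only [List.foldl_cons, List.foldl_nil, PySem.List.pyGetD_natCast]
    by_cases hgt : s.getD (L + 1) ' ' > s.getD j ' '
    · refine ⟨L + 1, le_rfl, by rw [if_pos hgt], ?_, ?_⟩
      · intro i hi
        rcases Nat.lt_or_ge i (L + 1) with h | h
        · exact le_of_lt (lt_of_le_of_lt (hmax i (by omega)) hgt)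
        · have : i = L + 1 := by omega
          subst this; exact le_rfl
      · intro i hi
        exact lt_of_le_of_lt (hmax i (by omega)) hgt
    · refine ⟨j, by omega, by rw [if_neg hgt], ?_, hstrict⟩
      intro i hi
      rcases Nat.lt_or_ge i (L + 1) with h | h
      · exact hmax i (by omega)
      · have : i = L + 1 := by omega
        subst this; exact le_of_not_gt hgt

theorem main_equiv : ∀ (fuel : Nat) (s : List Char) (k : Int), 0 ≤ k → k ≤ (s.length : Int) →
    k.toNat < fuel → getMaxVoltageAux fuel s k = (runAuxE [] s 0 k).reverse := by
  intro fuel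
  induction fuel with
  | zero => intro s k h0 h1 h2; omega
  | succ fuel ih =>
    intro s k h0 hlen hfuel
    by_cases hk0 : k = 0
    · subst hk0
      rw [getMaxVoltageAux, if_pos rfl, runAuxE_nil_of_nonpos s 0 0 le_rfl]
      rfl
    by_cases hkl : (s.length : Int) = k
    · rw [getMaxVoltageAux, if_neg hk0, if_pos hkl]
      rw [runAuxE_all_take [] s k (by simp; omega)]
      simp
    have hk1 : 1 ≤ k := by omega
    have hkn : k < (s.length : Int) := by omega
    have hLlt : s.length - k.toNat < s.length := by omega
    obtain ⟨j, hjL, hfold, hmax, hstrict⟩ := fold_argmax s (s.length - k.toNat) hLlt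
    have hjn : j < s.length := by omega
    rw [getMaxVoltageAux, if_neg hk0, if_neg hkl]
    have hrange : (s.length : Int) - k + 1 = ((s.length - k.toNat : Nat) : Int) + 1 := by
      omega
    rw [hrange, hfold]
    have hslice : PySem.List.slice s (some ((j : Int) + 1)) none = s.drop (j + 1) := by
      rw [show ((j : Int) + 1) = ((j + 1 : Nat) : Int) from by push_cast; ring]
      exact PySem.List.slice_from_natCast s (j + 1)
    simp only [hslice, PySem.List.pyGetD_natCast]
    rw [ih (s.drop (j + 1)) (k - 1) (by omega) (by simp; omega) (by omega)]
    -- right-hand side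
    have hdecomp : s = s.take j ++ (s[j] :: s.drop (j + 1)) := by
      conv_lhs => rw [← List.take_append_drop j s]
      rw [List.drop_eq_getElem_cons hjn]
    conv_rhs => rw [hdecomp, runAuxE_append]
    have hall : ∀ x ∈ runAuxE [] (s.take j) ((s[j] :: s.drop (j + 1)).length + 0) k, x < s[j] := by
      intro x hx
      rcases mem_runAuxE _ _ _ _ hx with h | h
      · simp at h
      · obtain ⟨i, hij, hxi⟩ := List.mem_take_iff_getElem.mp h
        have hiL : i < j := by omega
        have := hstrict i hiL
        rw [List.getD_eq_getElem s ' ' hjn, List.getD_eq_getElem s ' ' (by omega)] at this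
        rw [← hxi]
        exact this
    rw [runAuxE]
    rw [popWhile_of_all_lt _ _ _ _ hall (by simp; omega)]
    rw [if_pos (by simp; omega)]
    rw [show ([s[j]] : List Char) = [] ++ [s[j]] from rfl]
    rw [runAuxE_append_b [] (s.drop (j + 1)) s[j] 0 k ?H]
    · rw [List.reverse_append]
      simp [List.getElem?_eq_getElem hjn]
    case H =>
      intro jt hjt hlt
      rw [List.getElem_drop] at hlt
      have hnot : ¬ (j + 1 + jt ≤ s.length - k.toNat) := by
        intro hle
        have := hmax (j + 1 + jt) hle
        rw [List.getD_eq_getElem s ' ' hjn, List.getD_eq_getElem s ' ' (by simp at hjt; omega)] at this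
        exact absurd hlt (not_lt.mpr this)
      simp at hjt ⊢
      omega

-- ===== VERDICT (by name: the statement is the Claim_ definition above) =====
theorem getMaxVoltage_spec : Claim_equal_getMaxVoltage := by
  intro b k _ hp
  unfold Pre_getMaxVoltage at hp
  unfold Spec_getMaxVoltage getMaxVoltage getMaxVoltage_alt
  rw [main_equiv (b.toList.length + 1) b.toList k hp.1 hp.2 (by omega), runAuxE_zero]

theorem getMaxVoltage_raises : Claim_raises_getMaxVoltage := by
  unfold Claim_raises_getMaxVoltage
  exact ⟨by intro b k _ hr hp; exact (by unfold Raises_getMaxVoltage at hr; unfold Pre_getMaxVoltage at hp; omega), by decide⟩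

-- witness self-check: the crash-fix witness really lies inside Raises_ (extracted from the raises theorem)
theorem pvRaiseWitness_ok : Raises_getMaxVoltage pvRaiseWitness_getMaxVoltage.1 pvRaiseWitness_getMaxVoltage.2 :=
  getMaxVoltage_raises.2.2.1
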